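-- pv_equiv track=rewrite | github.com/renaism/syllable-tagger | src/training/augmentation.py | swap_consonants_word
-- ===== SOURCE A (Python) =====
-- CONSONANT_SWAP_MAP = {
--     'b': 'p', 'p': 'b',
--     'd': 't', 't': 'd',
--     'k': 'q', 'q': 'k',
--     'c': 'j', 'j': 'c',
--     'f': 'v', 'v': 'f',
--     's': 'z', 'z': 's',
--     'l': 'r', 'r': 'l',
-- }
--
-- def swap_consonants_word(syl_word):
--     # Convert syllable-segmented text to a list
--     letters = list(syl_word)
--
--     # Find all position of consonants that are swappable
--     swap_pos = []
--
--     for i in range(len(letters)):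
--         if letters[i] in CONSONANT_SWAP_MAP:
--             swap_pos.append(i)
--
--     # Number of possible variations
--     n = 2**len(swap_pos)
--
--     # Create a binary swap map
--     bin_format ='0{}b'.format(len(bin(n-1)[2:]))
--     swap_map = []
--
--     for i in range(n):
--         # Skip all 0 swap map (no swap / original word)
--         if i == 0:
--             continue
--
--         swap_map.append([int(x) for x in format(i, bin_format)])
--
--     # Swap the consonant based on the swap map
--     swapped_words = []
--
--     for sm_row in swap_map:
--         new_letters = letters[:]
--
--         for i, swap in enumerate(sm_row):
--             if swap == 1:
--                 swapped_letter = new_letters[swap_pos[i]]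
--                 new_letters[swap_pos[i]] = CONSONANT_SWAP_MAP[swapped_letter]
--
--         # Append consonant-swapped word to the array
--         new_syl = ''.join(new_letters)
--         new_word = new_syl.replace('.', '')
--         swapped_words.append((new_word, new_syl))
--
--     return swapped_words
-- ===== SOURCE B (Python) =====
-- CONSONANT_SWAP_MAP = {
--     'b': 'p', 'p': 'b',
--     'd': 't', 't': 'd',
--     'k': 'q', 'q': 'k',
--     'c': 'j', 'j': 'c',
--     'f': 'v', 'v': 'f',
--     's': 'z', 'z': 's',
--     'l': 'r', 'r': 'l',
-- }
--
-- def swap_consonants_word(syl_word):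
--     letters = list(syl_word)
--
--     # Grow the power set of swap choices: for each swappable position,
--     # every partial variant contributes itself (keep) and a copy with
--     # that single consonant swapped (swap).
--     results = [letters]
--     for i, c in enumerate(letters):
--         if c in CONSONANT_SWAP_MAP:
--             new_results = []
--             for r in results:
--                 swapped = r.copy()
--                 swapped[i] = CONSONANT_SWAP_MAP[c]
--                 new_results.append(r)
--                 new_results.append(swapped)
--             results = new_results
--
--     # Drop the all-original word, then build (word, syllabified) pairs.
--     out = []
--     for r in results[1:]:
--         syl = ''.join(r)
--         out.append((syl.replace('.', ''), syl))
--     return out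
-- ===== Notes on version B (the rewrite author's own statement) =====
-- stated objective: simpler
-- what changed: B grows the power set of swap choices incrementally (each swappable position doubles the list of partial variants, keep-then-swap) and drops the all-original head, instead of A's enumeration of integer bitmasks via binary string formatting and per-row index decoding.
import Mathlib
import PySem

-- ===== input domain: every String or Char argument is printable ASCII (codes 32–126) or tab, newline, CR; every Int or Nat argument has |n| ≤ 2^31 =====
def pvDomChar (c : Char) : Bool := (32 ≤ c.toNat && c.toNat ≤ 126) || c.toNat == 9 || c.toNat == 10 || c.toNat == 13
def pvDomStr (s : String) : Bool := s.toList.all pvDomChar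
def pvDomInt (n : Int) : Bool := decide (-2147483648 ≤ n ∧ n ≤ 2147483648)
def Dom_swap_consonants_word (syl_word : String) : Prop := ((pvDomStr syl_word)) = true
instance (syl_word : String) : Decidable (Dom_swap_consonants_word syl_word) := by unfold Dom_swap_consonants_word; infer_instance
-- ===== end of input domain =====

-- B builds the 2^k consonant-swap variants by incremental power-set doubling (keep-then-swap per
-- position, dropping the all-original head) instead of A's integer-bitmask enumeration via binary
-- string formatting; objective: simpler.


-- CONSONANT_SWAP_MAP (module-level constant shared by both Pythons)
def pvCsMap : PySem.Dict Char Char := PySem.Dict.ofList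
  [('b','p'), ('p','b'), ('d','t'), ('t','d'), ('k','q'), ('q','k'),
   ('c','j'), ('j','c'), ('f','v'), ('v','f'), ('s','z'), ('z','s'),
   ('l','r'), ('r','l')]

-- ===== PORT A =====
-- bin(m)[2:] for m ≥ 1 (Python's bin, digits MSB-first); empty for m = 0
def pvBinNatAux (m : Nat) : List Char :=
  if h : m = 0 then []
  else pvBinNatAux (m / 2) ++ [if m % 2 = 1 then '1' else '0']
decreasing_by exact Nat.div_lt_self (Nat.pos_of_ne_zero h) one_lt_two

-- bin(m)[2:] (Python prints '0' for 0)
def pvBinDigits (m : Nat) : List Char := if m = 0 then ['0'] else pvBinNatAux m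

-- format(i, '0{w}b') for i ≥ 0: binary digits left-padded with '0' to width w
def pvFormatBin (i : Nat) (w : Nat) : List Char :=
  List.replicate (w - (pvBinDigits i).length) '0' ++ pvBinDigits i

def swap_consonants_word (syl_word : String) : List (String × String) :=
  let letters := syl_word.toList
  let swap_pos : List Int :=
    (PySem.List.pyRange 0 (letters.length : Int) 1).foldl
      (fun acc i => if pvCsMap.contains (PySem.List.pyGetD letters i ' ') then acc ++ [i] else acc) []
  let n : Int := 2 ^ swap_pos.length
  -- bin_format = '0{}b'.format(len(bin(n-1)[2:])); n - 1 ≥ 0 always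
  let width := (pvBinDigits (n - 1).toNat).length
  let swap_map : List (List Int) :=
    (PySem.List.pyRange 0 n 1).foldl
      (fun acc i => if i = 0 then acc
        -- int(x) on the '0'/'1' characters format produces
        else acc ++ [(pvFormatBin i.toNat width).map (fun c => if c = '1' then (1 : Int) else 0)]) []
  swap_map.foldl (fun acc sm_row =>
    let new_letters := (PySem.List.enumerate sm_row 0).foldl
      (fun nl p => if p.2 = 1 then
          let pos := PySem.List.pyGetD swap_pos p.1 0
          -- CONSONANT_SWAP_MAP[c]: the key is always present (getD default never used)
          PySem.List.pySetD nl pos (pvCsMap.getD (PySem.List.pyGetD nl pos ' ') ' ')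
        else nl) letters
    let new_syl := String.ofList new_letters      -- ''.join(new_letters)
    acc ++ [(PySem.Str.replace new_syl "." "", new_syl)]) []

-- ===== PORT B =====
def swap_consonants_word_alt (syl_word : String) : List (String × String) :=
  let letters := syl_word.toList
  let results :=
    (PySem.List.enumerate letters 0).foldl
      (fun rs p => if pvCsMap.contains p.2 then
          rs.foldl (fun nr r =>
            nr ++ [r, PySem.List.pySetD r p.1 (pvCsMap.getD p.2 ' ')]) []
        else rs) [letters]
  -- results[1:]
  (results.drop 1).foldl (fun out r =>
    let syl := String.ofList r      -- ''.join(r)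
    out ++ [(PySem.Str.replace syl "." "", syl)]) []

-- ===== PRECONDITION & SPEC =====
def Spec_swap_consonants_word (syl_word : String) (out : List (String × String)) : Prop := out = swap_consonants_word_alt syl_word
instance (syl_word : String) (out : List (String × String)) : Decidable (Spec_swap_consonants_word syl_word out) := by unfold Spec_swap_consonants_word; infer_instance

-- ===== CLAIM (what is proved, stated in full; the proofs are below) =====
def Claim_equal_swap_consonants_word : Prop := ∀ (syl_word : String), Dom_swap_consonants_word syl_word → Spec_swap_consonants_word syl_word (swap_consonants_word syl_word)

-- ===== LEMMAS AND PROOFS =====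

-- (word, syllabified-word) pair built from a letter list
def pvPair (r : List Char) : String × String :=
  (PySem.Str.replace (String.ofList r) "." "", String.ofList r)

-- positions of swappable consonants, as Nats
def pvPosNat (ls : List Char) : List Nat :=
  (List.range ls.length).filter (fun k => pvCsMap.contains (ls.getD k ' '))

-- (position, original letter) pairs of swappable consonants
def pvSwaps (ls : List Char) : List (Nat × Char) :=
  (pvPosNat ls).map (fun k => (k, ls.getD k ' '))

-- binary digits of i as 0/1 Ints, width k, MSB first
def pvBits : Nat → Nat → List Int
  | 0, _ => []
  | k+1, i => pvBits k (i / 2) ++ [if i % 2 = 1 then 1 else 0]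

-- A's inner loop zipped: apply (position, bit) pairs left to right, fetching the current letter
def pvApplyZ : List Char → List (Nat × Int) → List Char
  | r, [] => r
  | r, (s, b) :: zs =>
      pvApplyZ (if b = 1 then r.set s (pvCsMap.getD (r.getD s ' ') ' ') else r) zs

-- B's power-set expansion: keep-then-swap per pair
def pvExpand : List (Nat × Char) → List Char → List (List Char)
  | [], r => [r]
  | p :: ps, r => pvExpand ps r ++ pvExpand ps (r.set p.1 (pvCsMap.getD p.2 ' '))

theorem pvBits_length (k : Nat) : ∀ i, (pvBits k i).length = k := by
  induction k with
  | zero => intro i; rfl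
  | succ k ih => intro i; simp [pvBits, ih]

theorem pvRange_two_mul (m : Nat) :
    List.range (2*m) = (List.range m).flatMap (fun j => [2*j, 2*j+1]) := by
  induction m with
  | zero => rfl
  | succ m ih =>
      have h1 : 2*(m+1) = (2*m + 1) + 1 := by ring
      rw [h1, List.range_succ, List.range_succ, ih, List.range_succ]
      simp [List.flatMap_append]

theorem pvReplicate_split (k : Nat) (hk : 1 ≤ k) :
    List.replicate k '0' = List.replicate (k-1) '0' ++ ['0'] := by
  rw [← List.replicate_succ']
  congr 1; omega

theorem pvBinNatAux_zero : pvBinNatAux 0 = [] := by rw [pvBinNatAux]; norm_num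

theorem pvBinDigits_zero : pvBinDigits 0 = ['0'] := rfl

theorem pvBinDigits_one : pvBinDigits 1 = ['1'] := by
  rw [pvBinDigits, if_neg one_ne_zero, pvBinNatAux]
  norm_num [pvBinNatAux_zero]

theorem pvFormatBin_succ (k : Nat) (hk : 1 ≤ k) (i : Nat) :
    pvFormatBin i (k+1) = pvFormatBin (i/2) k ++ [if i % 2 = 1 then '1' else '0'] := by
  rcases Nat.lt_or_ge i 2 with h2 | h2
  · interval_cases i
    · simp only [pvFormatBin, pvBinDigits_zero, List.length_singleton, Nat.zero_div, Nat.zero_mod,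
        Nat.add_sub_cancel]
      norm_num
      rw [pvReplicate_split k hk]
      simp
    · simp only [pvFormatBin, pvBinDigits_zero, pvBinDigits_one, List.length_singleton,
        Nat.add_sub_cancel, show (1:Nat)/2 = 0 from rfl, show (1:Nat) % 2 = 1 from rfl]
      norm_num
      rw [pvReplicate_split k hk]
      simp
  · have hne : i ≠ 0 := by omega
    have hd2 : i / 2 ≠ 0 := by omega
    have haux : pvBinNatAux i = pvBinNatAux (i/2) ++ [if i % 2 = 1 then '1' else '0'] := by
      rw [pvBinNatAux]; simp [hne]
    simp only [pvFormatBin, pvBinDigits, if_neg hne, if_neg hd2, haux]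
    rw [List.length_append]
    simp only [List.length_singleton]
    rw [show k + 1 - ((pvBinNatAux (i/2)).length + 1) = k - (pvBinNatAux (i/2)).length from by omega]
    simp [List.append_assoc]

theorem pvFmt_bits (k : Nat) (hk : 1 ≤ k) : ∀ i, i < 2^k →
    (pvFormatBin i k).map (fun c => if c = '1' then (1 : Int) else 0) = pvBits k i := by
  induction k with
  | zero => omega
  | succ k ih =>
      intro i hi
      rcases Nat.eq_zero_or_pos k with hk0 | hk1
      · subst hk0
        interval_cases i <;>
          simp [pvFormatBin, pvBinDigits_zero, pvBinDigits_one, pvBits]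
      · rw [pvFormatBin_succ k hk1 i, List.map_append, ih hk1 (i/2) (by omega)]
        rcases Nat.mod_two_eq_zero_or_one i with h | h <;> simp [pvBits, h]

theorem pvBinDigits_pow_sub_one (k : Nat) (hk : 1 ≤ k) :
    (pvBinDigits (2^k - 1)).length = k := by
  induction k with
  | zero => omega
  | succ k ih =>
      rcases Nat.eq_zero_or_pos k with hk0 | hk1
      · subst hk0; simp [pvBinDigits_one]
      · have hne : 2^(k+1) - 1 ≠ 0 := by have := Nat.one_lt_two_pow_iff (n := k+1); omega
        have hdiv : (2^(k+1) - 1) / 2 = 2^k - 1 := by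
          have h1 : 2^(k+1) = 2 * 2^k := by rw [pow_succ]; ring
          omega
        have hkne : 2^k - 1 ≠ 0 := by have := Nat.one_lt_two_pow_iff (n := k); omega
        simp only [pvBinDigits, if_neg hne, if_neg hkne] at *
        rw [pvBinNatAux]
        simp only [dif_neg hne, hdiv, List.length_append, List.length_singleton]
        specialize ih hk1
        omega

theorem pvApplyZ_append (zs ws : List (Nat × Int)) : ∀ (r : List Char),
    pvApplyZ r (zs ++ ws) = pvApplyZ (pvApplyZ r zs) ws := by
  induction zs with
  | nil => intro r; rfl
  | cons z zs ih => intro r; obtain ⟨s, b⟩ := z; simp [pvApplyZ, ih]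

theorem pvApplyZ_getD (zs : List (Nat × Int)) (m : Nat) : ∀ (r : List Char),
    (∀ z ∈ zs, z.1 ≠ m) → (pvApplyZ r zs).getD m ' ' = r.getD m ' ' := by
  induction zs with
  | nil => intro r _; rfl
  | cons z zs ih =>
      intro r h
      obtain ⟨s, b⟩ := z
      have hs : s ≠ m := h (s, b) (List.mem_cons_self)
      rw [pvApplyZ, ih _ (fun z hz => h z (List.mem_cons_of_mem _ hz))]
      split
      · simp [List.getD_eq_getElem?_getD, List.getElem?_set_ne hs]
      · rfl

theorem pvExpand_append_singleton (ps : List (Nat × Char)) (p : Nat × Char) : ∀ (r : List Char),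
    pvExpand (ps ++ [p]) r
      = (pvExpand ps r).flatMap (fun t => [t, t.set p.1 (pvCsMap.getD p.2 ' ')]) := by
  induction ps with
  | nil => intro r; simp [pvExpand]
  | cons q ps ih => intro r; simp [pvExpand, ih, List.flatMap_append]

theorem pvFoldl_if_filter {α β : Type} (c : β → Bool) (g : α → β → α) : ∀ (l : List β) (a : α),
    l.foldl (fun acc x => if c x then g acc x else acc) a = (l.filter c).foldl g a := by
  intro l
  induction l with
  | nil => intro a; rfl
  | cons x l ih =>
      intro a
      by_cases h : c x <;> simp [h, ih]

theorem pvBridgeA (row : List Int) : ∀ (pre sn : List Nat) (r : List Char),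
    row.length ≤ sn.length →
    (PySem.List.enumerate row (pre.length : Int)).foldl
      (fun nl p => if p.2 = 1 then
          PySem.List.pySetD nl (PySem.List.pyGetD ((pre ++ sn).map (fun (k : Nat) => (k : Int))) p.1 0)
            (pvCsMap.getD
              (PySem.List.pyGetD nl
                (PySem.List.pyGetD ((pre ++ sn).map (fun (k : Nat) => (k : Int))) p.1 0) ' ') ' ')
        else nl) r
      = pvApplyZ r (sn.zip row) := by
  induction row with
  | nil => intro pre sn r _; simp [PySem.List.enumerate, pvApplyZ]
  | cons b row ih =>
      intro pre sn r hlen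
      cases sn with
      | nil => simp at hlen
      | cons s sn =>
          rw [PySem.List.enumerate_cons, List.foldl_cons]
          have hget : PySem.List.pyGetD ((pre ++ s :: sn).map (fun (k : Nat) => (k : Int)))
              ((pre.length : Nat) : Int) 0 = (s : Int) := by
            rw [PySem.List.pyGetD_natCast, List.getD_eq_getElem?_getD, List.map_append]
            rw [List.getElem?_append_right (by simp)]
            simp
          have hrec := ih (pre ++ [s]) sn
          simp only [List.append_assoc, List.singleton_append, List.length_append,
            List.length_singleton] at hrec
          have hcast : ((pre.length : Int) + 1) = ((pre.length + 1 : Nat) : Int) := by push_cast; ring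
          rw [hcast]
          rw [hrec _ (by simpa using hlen)]
          simp only [hget]
          rw [List.zip_cons_cons, pvApplyZ]
          congr 1
          simp only [PySem.List.pySetD_natCast, PySem.List.pyGetD_natCast, List.getD_eq_getElem?_getD]

theorem pvBits_succ_two_mul (k j : Nat) : pvBits (k+1) (2*j) = pvBits k j ++ [(0:Int)] := by
  show pvBits k ((2*j)/2) ++ [if (2*j) % 2 = 1 then (1:Int) else 0] = _
  rw [show (2*j)/2 = j from by omega, show (2*j) % 2 = 0 from by omega]
  norm_num

theorem pvBits_succ_two_mul_add_one (k j : Nat) :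
    pvBits (k+1) (2*j+1) = pvBits k j ++ [(1:Int)] := by
  show pvBits k ((2*j+1)/2) ++ [if (2*j+1) % 2 = 1 then (1:Int) else 0] = _
  rw [show (2*j+1)/2 = j from by omega, show (2*j+1) % 2 = 1 from by omega]
  norm_num

theorem pvMain (qs : List (Nat × Char)) (r : List Char)
    (hpw : qs.Pairwise (fun a b => a.1 < b.1))
    (hchar : ∀ p ∈ qs, r.getD p.1 ' ' = p.2) :
    (List.range (2 ^ qs.length)).map
      (fun i => pvApplyZ r ((qs.map Prod.fst).zip (pvBits qs.length i))) = pvExpand qs r := by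
  induction qs using List.reverseRecOn with
  | nil => simp [pvBits, pvApplyZ, pvExpand]
  | append_singleton ps p ih =>
      have hps : ps.Pairwise (fun a b => a.1 < b.1) := (List.pairwise_append.mp hpw).1
      have hlt : ∀ a ∈ ps, a.1 < p.1 := fun a ha =>
        (List.pairwise_append.mp hpw).2.2 a ha p (List.mem_singleton_self p)
      have hcps : ∀ q ∈ ps, r.getD q.1 ' ' = q.2 := fun q hq =>
        hchar q (List.mem_append_left _ hq)
      have hcp : r.getD p.1 ' ' = p.2 :=
        hchar p (List.mem_append_right _ (List.mem_singleton_self p))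
      set k := ps.length with hk
      have hlen : (ps ++ [p]).length = k + 1 := by simp [hk]
      have hlfst : (ps.map Prod.fst).length = k := by simp [hk]
      have hmapf : (ps ++ [p]).map Prod.fst = ps.map Prod.fst ++ [p.1] := by simp
      have hpow : 2 ^ (ps ++ [p]).length = 2 * 2 ^ k := by rw [hlen, pow_succ]; ring
      have ht := ih hps hcps
      -- the two entries each j contributes
      have hF0 : ∀ j, pvApplyZ r (((ps ++ [p]).map Prod.fst).zip (pvBits (ps ++ [p]).length (2*j)))
          = pvApplyZ r ((ps.map Prod.fst).zip (pvBits k j)) := by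
        intro j
        rw [hlen, pvBits_succ_two_mul, hmapf,
          List.zip_append (by rw [hlfst, pvBits_length]), pvApplyZ_append]
        simp [pvApplyZ]
      have hgetp : ∀ j, (pvApplyZ r ((ps.map Prod.fst).zip (pvBits k j)))[p.1]?.getD ' ' = p.2 := by
        intro j
        rw [← List.getD_eq_getElem?_getD, pvApplyZ_getD _ _ _ ?_, hcp]
        intro z hz
        obtain ⟨a, ha, hfst⟩ := List.mem_map.mp (List.of_mem_zip hz).1
        exact hfst ▸ Nat.ne_of_lt (hlt a ha)
      have hF1 : ∀ j, pvApplyZ r (((ps ++ [p]).map Prod.fst).zip (pvBits (ps ++ [p]).length (2*j+1)))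
          = (pvApplyZ r ((ps.map Prod.fst).zip (pvBits k j))).set p.1 (pvCsMap.getD p.2 ' ') := by
        intro j
        rw [hlen, pvBits_succ_two_mul_add_one, hmapf,
          List.zip_append (by rw [hlfst, pvBits_length]), pvApplyZ_append]
        simp [pvApplyZ, hgetp j]
      rw [hpow, pvRange_two_mul, List.map_flatMap]
      rw [pvExpand_append_singleton, ← ht, List.flatMap_map]
      congr 1
      funext j
      simp only [List.map_cons, List.map_nil]
      rw [hF0 j, hF1 j]

theorem pvSwaps_map_fst (ls : List Char) : (pvSwaps ls).map Prod.fst = pvPosNat ls := by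
  simp [pvSwaps, Function.comp_def]

theorem pvDblFoldPos (ls : List Char) : ∀ (ks : List Nat) (rs : List (List Char)),
    ks.foldl (fun x y =>
        List.foldl (fun nr r => nr ++ [r, r.set y (pvCsMap.getD (ls.getD y ' ') ' ')]) [] x) rs
      = rs.flatMap (fun r => pvExpand (ks.map (fun k => (k, ls.getD k ' '))) r) := by
  intro ks
  induction ks with
  | nil => intro rs; simp [pvExpand]
  | cons k ks ih =>
      intro rs
      rw [List.foldl_cons,
        PySem.List.foldl_append_eq_flatMap (fun (r : List Char) => [r, r.set k (pvCsMap.getD (ls.getD k ' ') ' ')]),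
        List.nil_append, ih, List.flatMap_assoc]
      congr 1
      funext r
      simp [pvExpand]

theorem pvB_fold (ls : List Char) :
    (PySem.List.enumerate ls 0).foldl
      (fun rs p => if pvCsMap.contains p.2 then
          rs.foldl (fun nr r => nr ++ [r, PySem.List.pySetD r p.1 (pvCsMap.getD p.2 ' ')]) []
        else rs) [ls] = pvExpand (pvSwaps ls) ls := by
  rw [PySem.List.enumerate_eq_map_pyRange ls ' ']
  rw [show PySem.List.len ls = ((ls.length : Nat) : Int) from by simp]
  rw [PySem.List.pyRange_zero_nat, List.map_map, List.foldl_map]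
  simp only [Function.comp, PySem.List.pyGetD_natCast, PySem.List.pySetD_natCast]
  rw [pvFoldl_if_filter]
  rw [show (List.range ls.length).filter (fun k => pvCsMap.contains (ls.getD k ' '))
      = pvPosNat ls from rfl]
  rw [pvDblFoldPos]
  simp [pvSwaps]

theorem pvB_eq (s : String) :
    swap_consonants_word_alt s = ((pvExpand (pvSwaps s.toList) s.toList).drop 1).map pvPair := by
  refine Eq.trans (congrArg (fun rs => (List.drop 1 rs).foldl
      (fun out r => out ++ [(PySem.Str.replace (String.ofList r) "." "", String.ofList r)]) [])
      (pvB_fold s.toList)) ?_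
  simp only [PySem.List.foldl_append_singleton_eq_map, List.nil_append]
  rfl

theorem pvA_swap_pos (ls : List Char) :
    (PySem.List.pyRange 0 (ls.length : Int) 1).foldl
      (fun acc i => if pvCsMap.contains (PySem.List.pyGetD ls i ' ') then acc ++ [i] else acc) []
      = (pvPosNat ls).map (fun (k : Nat) => (k : Int)) := by
  rw [PySem.List.foldl_append_if_eq_filter, List.nil_append, PySem.List.pyRange_zero_nat,
    List.filter_map]
  congr 1
  apply List.filter_congr
  intro k _
  simp

theorem pvPosNat_pairwise (ls : List Char) : (pvPosNat ls).Pairwise (· < ·) :=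
  List.Pairwise.sublist List.filter_sublist List.pairwise_lt_range

theorem pvSwaps_pairwise (ls : List Char) :
    (pvSwaps ls).Pairwise (fun a b => a.1 < b.1) := by
  rw [pvSwaps, List.pairwise_map]
  exact pvPosNat_pairwise ls

theorem pvSwaps_char (ls : List Char) : ∀ p ∈ pvSwaps ls, ls.getD p.1 ' ' = p.2 := by
  intro p hp
  obtain ⟨k, _, rfl⟩ := List.mem_map.mp hp
  rfl

theorem pvA_inner (ls : List Char) (row : List Int) (h : row.length ≤ (pvPosNat ls).length) :
    (PySem.List.enumerate row 0).foldl
      (fun nl p => if p.2 = 1 then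
          PySem.List.pySetD nl
            (PySem.List.pyGetD ((pvPosNat ls).map (fun (k : Nat) => (k : Int))) p.1 0)
            (pvCsMap.getD (PySem.List.pyGetD nl
              (PySem.List.pyGetD ((pvPosNat ls).map (fun (k : Nat) => (k : Int))) p.1 0) ' ') ' ')
        else nl) ls
      = pvApplyZ ls ((pvPosNat ls).zip row) := by
  have := pvBridgeA row [] (pvPosNat ls) ls h
  simpa using this

theorem pvA_eq (s : String) :
    swap_consonants_word s = ((pvExpand (pvSwaps s.toList) s.toList).drop 1).map pvPair := by
  refine Eq.trans (congrArg (fun (sp : List Int) =>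
    (((PySem.List.pyRange 0 ((2:Int) ^ sp.length) 1).foldl
        (fun acc i => if i = 0 then acc
          else acc ++ [(pvFormatBin i.toNat
              ((pvBinDigits (((2:Int) ^ sp.length) - 1).toNat).length)).map
            (fun c => if c = '1' then (1:Int) else 0)]) []).foldl
      (fun acc sm_row =>
        acc ++ [pvPair ((PySem.List.enumerate sm_row 0).foldl
          (fun nl p => if p.2 = 1 then
              PySem.List.pySetD nl (PySem.List.pyGetD sp p.1 0)
                (pvCsMap.getD (PySem.List.pyGetD nl (PySem.List.pyGetD sp p.1 0) ' ') ' ')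
            else nl) s.toList)]) [])) (pvA_swap_pos s.toList)) ?_
  set ls := s.toList with hls
  set ks := pvPosNat ls with hks
  set kn := ks.length with hkn
  simp only
  have hlensp : (ks.map (fun (k : Nat) => (k : Int))).length = kn := by rw [List.length_map]
  rw [hlensp]
  have h1le : (1:Nat) ≤ 2^kn := Nat.one_le_two_pow
  have hn : ((2:Int) ^ kn) = (((2^kn : Nat) : Nat) : Int) := by push_cast; ring
  have hn1 : (((2:Int) ^ kn) - 1).toNat = 2^kn - 1 := by rw [hn]; omega
  rw [hn1]
  -- strip the i = 0 entry of the mask loop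
  have hpos : (0:Int) < ((2:Int) ^ kn) := by positivity
  rw [PySem.List.pyRange_one_cons hpos, List.foldl_cons, if_pos rfl]
  rw [PySem.List.foldl_congr_mem _ _
    (fun acc (i : Int) => acc ++ [(pvFormatBin i.toNat ((pvBinDigits (2^kn - 1)).length)).map
      (fun c => if c = '1' then (1:Int) else 0)]) _
    (by
      intro acc i hi
      have : (1:Int) ≤ i := (PySem.List.mem_pyRange_one.mp hi).1
      rw [if_neg (by omega)])]
  rw [PySem.List.foldl_append_singleton_eq_map, List.nil_append]
  rw [PySem.List.foldl_append_singleton_eq_map, List.nil_append]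
  rw [List.map_map]
  -- express the mapped range as the tail of the full range
  have hcons : PySem.List.pyRange 0 ((2:Int) ^ kn) 1
      = 0 :: PySem.List.pyRange 1 ((2:Int) ^ kn) 1 := PySem.List.pyRange_one_cons hpos
  have htail : PySem.List.pyRange 1 ((2:Int) ^ kn) 1
      = (PySem.List.pyRange 0 ((2:Int) ^ kn) 1).tail := by rw [hcons, List.tail_cons]
  rw [show (0:Int) + 1 = 1 from rfl, htail, List.map_tail]
  rcases Nat.eq_zero_or_pos kn with hk0 | hk1
  · -- no swappable consonant: both sides are []
    have h193 : ks = [] := List.length_eq_zero_iff.mp hk0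
    have hr1 : PySem.List.pyRange 0 ((2:Int) ^ kn) 1 = [(0:Int)] := by
      rw [hk0, pow_zero]
      simpa using PySem.List.pyRange_one_singleton (a := 0)
    rw [hr1]
    have hexp : pvExpand (pvSwaps ls) ls = [ls] := by
      rw [pvSwaps, ← hks, h193]
      simp [pvExpand]
    rw [hexp]
    simp
  · -- main case
    have hwidth : (pvBinDigits (2^kn - 1)).length = kn := pvBinDigits_pow_sub_one kn hk1
    rw [hwidth, hn, PySem.List.pyRange_zero_nat, List.map_map]
    have hmap : ∀ j ∈ List.range (2^kn),
        (((fun sm_row => pvPair ((PySem.List.enumerate sm_row 0).foldl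
            (fun nl p => if p.2 = 1 then
                PySem.List.pySetD nl
                  (PySem.List.pyGetD (ks.map (fun (k : Nat) => (k : Int))) p.1 0)
                  (pvCsMap.getD (PySem.List.pyGetD nl
                    (PySem.List.pyGetD (ks.map (fun (k : Nat) => (k : Int))) p.1 0) ' ') ' ')
              else nl) ls)) ∘
          (fun i => (pvFormatBin i.toNat kn).map (fun c => if c = '1' then (1:Int) else 0))) ∘
          (fun (k : Nat) => (k : Int))) j
          = pvPair (pvApplyZ ls (ks.zip (pvBits kn j))) := by
      intro j hj
      have hj' : j < 2^kn := List.mem_range.mp hj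
      simp only [Function.comp_apply, Int.toNat_natCast]
      rw [pvFmt_bits kn hk1 j hj']
      rw [pvA_inner ls (pvBits kn j) (by rw [pvBits_length])]
    rw [List.map_congr_left hmap]
    have hqs : (pvSwaps ls).length = kn := by rw [pvSwaps, ← hks, List.length_map]
    have hmain := pvMain (pvSwaps ls) ls (pvSwaps_pairwise ls) (pvSwaps_char ls)
    rw [pvSwaps_map_fst, hqs] at hmain
    have hcomp : (List.range (2^kn)).map (fun j => pvPair (pvApplyZ ls (ks.zip (pvBits kn j))))
        = ((List.range (2^kn)).map (fun i => pvApplyZ ls (ks.zip (pvBits kn i)))).map pvPair := by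
      rw [List.map_map]; rfl
    rw [hcomp, hmain, List.drop_one, List.map_tail]

-- ===== VERDICT (by name: the statement is the Claim_ definition above) =====
theorem swap_consonants_word_spec : Claim_equal_swap_consonants_word := by
  intro syl_word _
  unfold Spec_swap_consonants_word
  rw [pvA_eq, pvB_eq]
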